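-- pv_equiv track=rewrite | github.com/wonderbeyond/python-server-side-apps-template | template/{{core_pkg_name}}/utils/seq.py | interlude
-- ===== SOURCE A (Python) =====
-- from typing import Any
-- from collections.abc import Sequence
--
-- def interlude(seq: Sequence[Any], lude: Any, /) -> Sequence[Any]:
--     """
--     >>> interlude(["a", "b", "c"], "-")
--     ['a', '-', 'b', '-', 'c']
--
--     >>> interlude((1, 2, 3), 0)
--     (1, 0, 2, 0, 3)
--     """
--     seq_type = type(seq)
--     seq_len = len(seq)
--     ret_elms = []
--
--     for idx, val in enumerate(seq):
--         ret_elms.append(val)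
--         if idx != seq_len - 1:
--             ret_elms.append(lude)
--
--     return seq_type(ret_elms)
-- ===== SOURCE B (Python) =====
-- from itertools import chain, islice, repeat
--
--
-- def interlude(seq, lude, /):
--     seq_type = type(seq)
--     stream = chain.from_iterable(zip(seq, repeat(lude)))
--     return seq_type(list(islice(stream, max(0, 2 * len(seq) - 1))))
-- ===== Notes on version B (the rewrite author's own statement) =====
-- stated objective: idiomatic
-- what changed: Replaces the indexed loop with a conditional separator-append by an itertools pipeline: zip the sequence with a repeated separator, flatten, and truncate to 2*len-1 elements to drop the trailing separator.
import Mathlib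
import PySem

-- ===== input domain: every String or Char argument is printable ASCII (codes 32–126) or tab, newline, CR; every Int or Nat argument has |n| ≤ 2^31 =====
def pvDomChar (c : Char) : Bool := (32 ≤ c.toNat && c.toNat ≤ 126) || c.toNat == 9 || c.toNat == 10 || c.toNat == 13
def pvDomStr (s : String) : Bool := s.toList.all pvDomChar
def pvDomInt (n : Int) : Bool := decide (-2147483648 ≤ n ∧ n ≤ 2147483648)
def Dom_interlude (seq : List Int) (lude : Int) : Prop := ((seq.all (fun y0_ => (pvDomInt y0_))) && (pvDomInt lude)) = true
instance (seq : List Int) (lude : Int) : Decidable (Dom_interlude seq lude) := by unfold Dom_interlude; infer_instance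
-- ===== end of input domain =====

-- B replaces A's indexed loop (append value, conditionally append separator) by an
-- interleave-then-truncate pipeline: zip with the repeated separator, flatten, take 2*len-1.
-- ===== PORT A =====
-- loop 'for idx, val in enumerate(seq): ret_elms.append(val); if idx != seq_len-1: ret_elms.append(lude)'
def interludeLoop (lude : Int) (n : Int) : List (Int × Int) → List Int → List Int
  | [], acc => acc
  | (i, v) :: rest, acc =>
      interludeLoop lude n rest (if i ≠ n - 1 then acc ++ [v] ++ [lude] else acc ++ [v])

def interlude (seq : List Int) (lude : Int) : List Int :=
  interludeLoop lude (seq.length : Int) (PySem.List.enumerate seq) []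

-- ===== PORT B =====
-- zip(seq, repeat(lude)) flattened = flatMap (fun v => [v, lude]); islice(·, max(0, 2*len-1)) = take
def interlude_alt (seq : List Int) (lude : Int) : List Int :=
  (seq.flatMap (fun v => [v, lude])).take (max 0 (2 * (seq.length : Int) - 1)).toNat

-- ===== PRECONDITION & SPEC =====
def Spec_interlude (seq : List Int) (lude : Int) (out : List Int) : Prop := out = interlude_alt seq lude
instance (seq : List Int) (lude : Int) (out : List Int) : Decidable (Spec_interlude seq lude out) := by unfold Spec_interlude; infer_instance

-- ===== CLAIM (what is proved, stated in full; the proofs are below) =====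
def Claim_equal_interlude : Prop := ∀ (seq : List Int) (lude : Int), Dom_interlude seq lude → Spec_interlude seq lude (interlude seq lude)

-- ===== LEMMAS AND PROOFS =====


-- characterisation of B on a cons cell
theorem alt_cons (x : Int) (xs : List Int) (lude : Int) :
    interlude_alt (x :: xs) lude = x :: xs.flatMap (fun v => [lude, v]) := by
  induction xs generalizing x with
  | nil => simp [interlude_alt]
  | cons y ys ih =>
      have h2 := ih y
      simp only [interlude_alt] at h2 ⊢
      have hn : (max 0 (2 * (((x :: y :: ys).length : Nat) : Int) - 1)).toNat
          = ((max 0 (2 * (((y :: ys).length : Nat) : Int) - 1)).toNat + 1) + 1 := by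
        simp; omega
      rw [hn, List.flatMap_cons]
      simp only [List.cons_append, List.nil_append, List.take_succ_cons]
      rw [h2]
      simp

-- the loop invariant for A
theorem loop_inv (lude : Int) (n : Int) (x : Int) (xs : List Int) (k : Int) (acc : List Int)
    (h : k + xs.length + 1 = n) :
    interludeLoop lude n (PySem.List.enumerate (x :: xs) k) acc
      = acc ++ x :: xs.flatMap (fun v => [lude, v]) := by
  induction xs generalizing x k acc with
  | nil =>
      have hk : k = n - 1 := by simp at h; omega
      simp [PySem.List.enumerate_cons, PySem.List.enumerate_nil, interludeLoop, hk]
  | cons y ys ih =>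
      have hk : k ≠ n - 1 := by simp at h; omega
      have h' : (k + 1) + (ys.length : Int) + 1 = n := by simp at h; omega
      rw [PySem.List.enumerate_cons, interludeLoop, if_pos hk,
        ih y (k + 1) _ h']
      simp

-- ===== VERDICT (by name: the statement is the Claim_ definition above) =====
theorem interlude_spec : Claim_equal_interlude := by
  intro seq lude _
  show interlude seq lude = interlude_alt seq lude
  cases seq with
  | nil => rfl
  | cons x xs =>
      rw [alt_cons]
      exact loop_inv lude _ x xs 0 [] (by simp)
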